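-- pv_equiv track=rewrite | github.com/MrIsaar/MachineLearning | DecisionTree/ID3Constructor.py | solveNumberic
-- ===== SOURCE A (Python) =====
-- def findMedian(examples,index):
--     allnumbers = []
--     for example in examples:
--         allnumbers.append(example[index])
--     allnumbers.sort()
--     return allnumbers[(math.floor(len(allnumbers)/2))]
--
-- def solveNumberic(examples,attributes,columns):
--     changed = False
--     newAttributes = {}
--     for attribute in attributes:
--         value = attributes[attribute][0]
--         if value.startswith("<") and value.endswith(">"):
--             index = columns.index(attribute)
--             median = findMedian(examples,index)
--             valueless = "<<" +str(median)+">"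
--             valuemore = "<>" +str(median)+">"
--             newAttributes[attribute] = [valueless,valuemore]
--             changed = True
--         else:
--             newAttributes[attribute] = attributes[attribute]
--     if changed:
--         return newAttributes
--     else:
--         return attributes
-- ===== SOURCE B (Python) =====
-- def _select(xs, k):
--     # k-th smallest of xs (0-based), quickselect with middle-element pivot
--     if not xs:
--         return ""
--     pivot = xs[len(xs) // 2]
--     lt = [x for x in xs if x < pivot]
--     if k < len(lt):
--         return _select(lt, k)
--     gt = [x for x in xs if pivot < x]
--     eq = len(xs) - len(lt) - len(gt)
--     if k < len(lt) + eq: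
--         return pivot
--     return _select(gt, k - (len(lt) + eq))
--
-- def solveNumberic(examples, attributes, columns):
--     def newValues(attribute, values):
--         value = values[0]
--         if value.startswith("<") and value.endswith(">"):
--             index = columns.index(attribute)
--             col = [example[index] for example in examples]
--             median = _select(col, len(col) // 2)
--             return ["<<" + median + ">", "<>" + median + ">"]
--         return values
--     return {attribute: newValues(attribute, values)
--             for attribute, values in attributes.items()}
-- ===== Notes on version B (the rewrite author's own statement) =====
-- stated objective: alternative
-- what changed: B finds each numeric attribute's median by quickselect (partition around a middle pivot, recurse into one side) at rank floor(n/2) instead of fully sorting the column, and builds the result with a single per-attribute map instead of A's changed-flag plus dict rebuild; the asymptotic win (expected O(n) selection vs O(n log n) sort) is not measurable against CPython's C-implemented sort.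
import Mathlib
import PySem

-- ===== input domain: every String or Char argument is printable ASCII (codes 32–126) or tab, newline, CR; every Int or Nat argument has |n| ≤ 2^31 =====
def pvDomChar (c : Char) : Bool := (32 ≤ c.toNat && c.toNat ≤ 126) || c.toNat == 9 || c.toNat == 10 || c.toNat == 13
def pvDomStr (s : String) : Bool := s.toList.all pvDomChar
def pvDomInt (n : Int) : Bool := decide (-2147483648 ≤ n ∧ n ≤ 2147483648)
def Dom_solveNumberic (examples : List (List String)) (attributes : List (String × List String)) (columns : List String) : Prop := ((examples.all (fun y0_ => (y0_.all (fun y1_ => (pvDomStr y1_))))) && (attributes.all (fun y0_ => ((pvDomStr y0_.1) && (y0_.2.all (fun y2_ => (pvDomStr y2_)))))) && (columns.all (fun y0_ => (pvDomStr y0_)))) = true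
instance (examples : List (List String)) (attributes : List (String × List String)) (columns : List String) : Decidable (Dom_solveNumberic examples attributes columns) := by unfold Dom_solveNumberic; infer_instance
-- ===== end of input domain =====

-- B replaces A's sort-then-index median (per numeric attribute) by a quickselect of the
-- element at rank floor(n/2), and builds the result by a single map instead of a
-- changed-flag plus dict rebuild; return values agree on all of Pre_.

-- ===== PORT A =====
def findMedian (examples : List (List String)) (index : Int) : String :=
  let allnumbers := examples.foldl (fun acc ex => acc ++ [PySem.List.pyGetD ex index ""]) []
  let sortednums := PySem.List.sorted allnumbers (fun x => x) false
  PySem.List.pyGetD sortednums (PySem.Int.floordiv (PySem.List.len sortednums) 2) ""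

def solveNumberic (examples : List (List String)) (attributes : List (String × List String)) (columns : List String) : List (String × List String) :=
  let st := attributes.foldl (fun (st : Bool × PySem.Dict String (List String)) p =>
    let vals := (PySem.Dict.mk attributes).getD p.1 []
    let value := PySem.List.pyGetD vals 0 ""
    if PySem.Str.startswith value "<" && PySem.Str.endswith value ">" then
      let index : Int := (((PySem.List.index? columns p.1).getD 0 : Nat) : Int)
      let median := findMedian examples index
      (true, st.2.insert p.1 ["<<" ++ median ++ ">", "<>" ++ median ++ ">"])
    else
      (st.1, st.2.insert p.1 vals)) ((false : Bool), PySem.Dict.empty)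
  if st.1 then st.2.items else attributes

-- ===== PORT B =====
-- termination helpers for pvSelect (cited by its decreasing_by)
theorem pvFilterLtLength {xs : List String} {p : String → Bool} {x : String}
    (hx : x ∈ xs) (hp : p x = false) : (xs.filter p).length < xs.length := by
  rw [← List.countP_eq_length_filter]
  rw [List.countP_lt_length_iff]
  exact ⟨x, hx, hp⟩

theorem pvGetDMidMem {xs : List String} (h : xs ≠ []) : xs.getD (xs.length / 2) "" ∈ xs := by
  have hl : 0 < xs.length := List.length_pos_iff.mpr h
  have hlt : xs.length / 2 < xs.length := Nat.div_lt_self hl (by norm_num)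
  rw [List.getD_eq_getElem xs "" hlt]
  exact List.getElem_mem hlt

def pvLtList (xs : List String) (pivot : String) : List String := xs.filter (fun x => decide (x < pivot))
def pvGtList (xs : List String) (pivot : String) : List String := xs.filter (fun x => decide (pivot < x))

theorem pvLtList_len {xs : List String} (h : xs ≠ []) :
    (pvLtList xs (xs.getD (xs.length / 2) "")).length < xs.length :=
  pvFilterLtLength (pvGetDMidMem h) (by simp)

theorem pvGtList_len {xs : List String} (h : xs ≠ []) :
    (pvGtList xs (xs.getD (xs.length / 2) "")).length < xs.length :=
  pvFilterLtLength (pvGetDMidMem h) (by simp)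

def pvSelect (xs : List String) (k : Nat) : String :=
  if hxs : xs = [] then ""
  else
    let pivot := xs.getD (xs.length / 2) ""
    let lt := pvLtList xs pivot
    if k < lt.length then pvSelect lt k
    else
      let gt := pvGtList xs pivot
      let eqn := xs.length - lt.length - gt.length
      if k < lt.length + eqn then pivot
      else pvSelect gt (k - (lt.length + eqn))
termination_by xs.length
decreasing_by
  · exact pvLtList_len hxs
  · exact pvGtList_len hxs

def pvNewValues (examples : List (List String)) (columns : List String) (attrName : String) (values : List String) : List String :=
  let value := PySem.List.pyGetD values 0 ""
  if PySem.Str.startswith value "<" && PySem.Str.endswith value ">" then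
    let index : Int := (((PySem.List.index? columns attrName).getD 0 : Nat) : Int)
    let col := examples.map (fun ex => PySem.List.pyGetD ex index "")
    let median := pvSelect col (col.length / 2)
    ["<<" ++ median ++ ">", "<>" ++ median ++ ">"]
  else values

def solveNumberic_alt (examples : List (List String)) (attributes : List (String × List String)) (columns : List String) : List (String × List String) :=
  attributes.map (fun p => (p.1, pvNewValues examples columns p.1 p.2))

-- ===== PRECONDITION & SPEC =====
-- Pre_ excludes association lists with duplicate keys (they do not denote a Python dict) and
-- exactly the inputs where A raises: an attribute with an empty value list (IndexError), a
-- numeric attribute absent from columns (ValueError), no examples or an example row too short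
-- for the attribute's column index (IndexError).
def Pre_solveNumberic (examples : List (List String)) (attributes : List (String × List String)) (columns : List String) : Prop :=
  (attributes.map Prod.fst).Nodup ∧
  ∀ p ∈ attributes, p.2 ≠ [] ∧
    ((PySem.Str.startswith (PySem.List.pyGetD p.2 0 "") "<" &&
      PySem.Str.endswith (PySem.List.pyGetD p.2 0 "") ">") = true →
      p.1 ∈ columns ∧ examples ≠ [] ∧ ∀ e ∈ examples, columns.idxOf p.1 < e.length)
instance (examples : List (List String)) (attributes : List (String × List String)) (columns : List String) : Decidable (Pre_solveNumberic examples attributes columns) := by unfold Pre_solveNumberic; infer_instance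

def pvWitness_solveNumberic : List (List String) × (List (String × List String)) × List String :=
  ([["1"], ["3"], ["2"]], [("a", ["<1>", "<2>"]), ("b", ["x"])], ["a", "b"])

def Spec_solveNumberic (examples : List (List String)) (attributes : List (String × List String)) (columns : List String) (out : List (String × List String)) : Prop := out = solveNumberic_alt examples attributes columns
instance (examples : List (List String)) (attributes : List (String × List String)) (columns : List String) (out : List (String × List String)) : Decidable (Spec_solveNumberic examples attributes columns out) := by unfold Spec_solveNumberic; infer_instance

-- ===== CLAIM (what is proved, stated in full; the proofs are below) =====
def Claim_equal_solveNumberic : Prop := ∀ (examples : List (List String)) (attributes : List (String × List String)) (columns : List String), Dom_solveNumberic examples attributes columns → Pre_solveNumberic examples attributes columns → Spec_solveNumberic examples attributes columns (solveNumberic examples attributes columns)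

-- ===== LEMMAS AND PROOFS =====

-- the test A applies to an attribute's first value, and B's per-attribute rewrite
def pvPat (p : String × List String) : Bool :=
  PySem.Str.startswith (PySem.List.pyGetD p.2 0 "") "<" && PySem.Str.endswith (PySem.List.pyGetD p.2 0 "") ">"

-- pvSelect returns a member of xs whose rank brackets k: at most k elements are strictly
-- below it and more than k are at or below it
theorem pvSelect_unfold (xs : List String) (k : Nat) (hxs : xs ≠ []) :
    pvSelect xs k =
      (if k < (pvLtList xs (xs.getD (xs.length / 2) "")).length then
        pvSelect (pvLtList xs (xs.getD (xs.length / 2) "")) k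
      else if k < (pvLtList xs (xs.getD (xs.length / 2) "")).length +
          (xs.length - (pvLtList xs (xs.getD (xs.length / 2) "")).length -
            (pvGtList xs (xs.getD (xs.length / 2) "")).length) then
        xs.getD (xs.length / 2) ""
      else
        pvSelect (pvGtList xs (xs.getD (xs.length / 2) ""))
          (k - ((pvLtList xs (xs.getD (xs.length / 2) "")).length +
            (xs.length - (pvLtList xs (xs.getD (xs.length / 2) "")).length -
              (pvGtList xs (xs.getD (xs.length / 2) "")).length)))) := by
  rw [pvSelect, dif_neg hxs]

theorem pvSelect_bracket : ∀ (n : Nat) (xs : List String) (k : Nat), xs.length ≤ n → k < xs.length →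
    pvSelect xs k ∈ xs ∧
    xs.countP (fun y => decide (y < pvSelect xs k)) ≤ k ∧
    k < xs.countP (fun y => decide (y ≤ pvSelect xs k)) := by
  intro n
  induction n with
  | zero => intro xs k hn hk; omega
  | succ n ih =>
    intro xs k hn hk
    have hxs : xs ≠ [] := by intro h; subst h; simp at hk
    rw [pvSelect_unfold xs k hxs]
    set pivot := xs.getD (xs.length / 2) "" with hpiv
    have hpm : pivot ∈ xs := pvGetDMidMem hxs
    have hltc : (pvLtList xs pivot).length = xs.countP (fun y => decide (y < pivot)) := by
      unfold pvLtList; rw [← List.countP_eq_length_filter]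
    have hgtc : (pvGtList xs pivot).length = xs.countP (fun y => decide (pivot < y)) := by
      unfold pvGtList; rw [← List.countP_eq_length_filter]
    have hsum : (pvLtList xs pivot).length + (pvGtList xs pivot).length ≤ xs.length := by
      have hsplit := List.length_eq_countP_add_countP (fun y => decide (y < pivot)) (l := xs)
      have hmono : xs.countP (fun y => decide (pivot < y)) ≤
          xs.countP (fun a => decide (¬decide (a < pivot) = true)) := by
        apply List.countP_mono_left
        intro y _ hy
        simp only [decide_eq_true_eq] at hy ⊢
        exact lt_asymm hy
      omega
    by_cases h1 : k < (pvLtList xs pivot).length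
    · -- recurse into lt
      rw [if_pos h1]
      have hlt_le : (pvLtList xs pivot).length ≤ n := by
        have hx := pvLtList_len hxs; rw [← hpiv] at hx; omega
      obtain ⟨hrmem, hr1, hr2⟩ := ih (pvLtList xs pivot) k hlt_le h1
      have hrx : pvSelect (pvLtList xs pivot) k ∈ xs ∧
          pvSelect (pvLtList xs pivot) k < pivot := by
        have := List.mem_filter.mp hrmem
        exact ⟨this.1, by simpa using this.2⟩
      refine ⟨hrx.1, ?_, ?_⟩
      · have hcc : xs.countP (fun y => decide (y < pvSelect (pvLtList xs pivot) k)) =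
            (pvLtList xs pivot).countP (fun y => decide (y < pvSelect (pvLtList xs pivot) k)) := by
          unfold pvLtList
          rw [List.countP_filter]
          apply List.countP_congr
          intro a _
          simp only [Bool.and_eq_true, decide_eq_true_eq]
          exact ⟨fun h => ⟨h, lt_trans h hrx.2⟩, fun h => h.1⟩
        omega
      · have hcc : xs.countP (fun y => decide (y ≤ pvSelect (pvLtList xs pivot) k)) =
            (pvLtList xs pivot).countP (fun y => decide (y ≤ pvSelect (pvLtList xs pivot) k)) := by
          unfold pvLtList
          rw [List.countP_filter]
          apply List.countP_congr
          intro a _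
          simp only [Bool.and_eq_true, decide_eq_true_eq]
          exact ⟨fun h => ⟨h, lt_of_le_of_lt h hrx.2⟩, fun h => h.1⟩
        omega
    · rw [if_neg h1]
      have hle : xs.countP (fun y => decide (y ≤ pivot)) = xs.length - (pvGtList xs pivot).length := by
        have hsplit := List.length_eq_countP_add_countP (fun y => decide (pivot < y)) (l := xs)
        have hcc : xs.countP (fun y => decide (y ≤ pivot)) =
            xs.countP (fun a => decide (¬decide (pivot < a) = true)) := by
          apply List.countP_congr
          intro a _
          simp only [decide_eq_true_eq, not_lt]
        omega
      by_cases h2 : k < (pvLtList xs pivot).length +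
          (xs.length - (pvLtList xs pivot).length - (pvGtList xs pivot).length)
      · rw [if_pos h2]
        refine ⟨hpm, by omega, by omega⟩
      · rw [if_neg h2]
        set k' := k - ((pvLtList xs pivot).length +
          (xs.length - (pvLtList xs pivot).length - (pvGtList xs pivot).length)) with hk'def
        have hk' : k' < (pvGtList xs pivot).length := by omega
        have hgt_le : (pvGtList xs pivot).length ≤ n := by
          have hx := pvGtList_len hxs; rw [← hpiv] at hx; omega
        obtain ⟨hrmem, hr1, hr2⟩ := ih (pvGtList xs pivot) k' hgt_le hk'
        have hrx : pvSelect (pvGtList xs pivot) k' ∈ xs ∧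
            pivot < pvSelect (pvGtList xs pivot) k' := by
          have := List.mem_filter.mp hrmem
          exact ⟨this.1, by simpa using this.2⟩
        have hperm := List.filter_append_perm (fun y => decide (pivot < y)) xs
        have hrest : (xs.filter (fun y => !decide (pivot < y))).length =
            xs.length - (pvGtList xs pivot).length := by
          have := hperm.length_eq
          simp only [List.length_append] at this
          unfold pvGtList
          omega
        have hrestlt : (xs.filter (fun y => !decide (pivot < y))).countP
            (fun y => decide (y < pvSelect (pvGtList xs pivot) k')) =
            (xs.filter (fun y => !decide (pivot < y))).length := by
          rw [List.countP_eq_length]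
          intro a ha
          have := List.mem_filter.mp ha
          have hap : ¬ pivot < a := by simpa using this.2
          simp only [decide_eq_true_eq]
          exact lt_of_le_of_lt (not_lt.mp hap) hrx.2
        have hrestle : (xs.filter (fun y => !decide (pivot < y))).countP
            (fun y => decide (y ≤ pvSelect (pvGtList xs pivot) k')) =
            (xs.filter (fun y => !decide (pivot < y))).length := by
          rw [List.countP_eq_length]
          intro a ha
          have := List.mem_filter.mp ha
          have hap : ¬ pivot < a := by simpa using this.2
          simp only [decide_eq_true_eq]
          exact le_of_lt (lt_of_le_of_lt (not_lt.mp hap) hrx.2)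
        have hsplitlt : xs.countP (fun y => decide (y < pvSelect (pvGtList xs pivot) k')) =
            (pvGtList xs pivot).countP (fun y => decide (y < pvSelect (pvGtList xs pivot) k')) +
            (xs.filter (fun y => !decide (pivot < y))).countP
              (fun y => decide (y < pvSelect (pvGtList xs pivot) k')) := by
          rw [← hperm.countP_eq, List.countP_append]; rfl
        have hsplitle : xs.countP (fun y => decide (y ≤ pvSelect (pvGtList xs pivot) k')) =
            (pvGtList xs pivot).countP (fun y => decide (y ≤ pvSelect (pvGtList xs pivot) k')) +
            (xs.filter (fun y => !decide (pivot < y))).countP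
              (fun y => decide (y ≤ pvSelect (pvGtList xs pivot) k')) := by
          rw [← hperm.countP_eq, List.countP_append]; rfl
        exact ⟨hrx.1, by omega, by omega⟩

-- an index whose rank is bracketed holds x in any ≤-monotone list
theorem pvBracket_getElem (s : List String) (k : Nat) (x : String) (hk : k < s.length)
    (hmono : ∀ i j (hij : i ≤ j) (hj : j < s.length), s[i]'(Nat.lt_of_le_of_lt hij hj) ≤ s[j])
    (h1 : s.countP (fun y => decide (y < x)) ≤ k)
    (h2 : k < s.countP (fun y => decide (y ≤ x))) : s[k] = x := by
  rcases lt_trichotomy s[k] x with hvx | hvx | hvx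
  · exfalso
    have htake : (s.take (k+1)).countP (fun y => decide (y < x)) = (s.take (k+1)).length := by
      rw [List.countP_eq_length]
      intro a ha
      rw [List.mem_take_iff_getElem] at ha
      obtain ⟨j, hj, hja⟩ := ha
      have hjk : j ≤ k := by omega
      have hmj := hmono j k hjk hk
      simp only [decide_eq_true_eq]
      calc a = s[j]'(by omega) := hja.symm
        _ ≤ s[k] := hmj
        _ < x := hvx
    have hlentake : (s.take (k+1)).length = k+1 := by
      rw [List.length_take]; omega
    have hct : k+1 ≤ s.countP (fun y => decide (y < x)) := by
      conv_rhs => rw [← List.take_append_drop (k+1) s]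
      rw [List.countP_append]
      omega
    omega
  · exact hvx
  · exfalso
    have hdrop : (s.drop k).countP (fun y => decide (y ≤ x)) = 0 := by
      rw [List.countP_eq_zero]
      intro a ha
      rw [List.mem_drop_iff_getElem] at ha
      obtain ⟨j, hj, hja⟩ := ha
      have hmj := hmono k (k+j) (by omega) (by omega)
      simp only [decide_eq_true_eq, not_le]
      calc x < s[k] := hvx
        _ ≤ s[k+j]'(by omega) := hmj
        _ = a := hja
    have hc : s.countP (fun y => decide (y ≤ x)) ≤ k := by
      conv_lhs => rw [← List.take_append_drop k s]
      rw [List.countP_append, hdrop]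
      have h3 := List.countP_le_length (p := fun y => decide (y ≤ x)) (l := s.take k)
      have h4 : (s.take k).length ≤ k := by rw [List.length_take]; omega
      omega
    omega

-- a position whose rank is bracketed is the value of the Python-sorted list at that position
theorem pvSorted_bracket (xs : List String) (k : Nat) (x : String) (hk : k < xs.length)
    (h1 : xs.countP (fun y => decide (y < x)) ≤ k)
    (h2 : k < xs.countP (fun y => decide (y ≤ x))) :
    (PySem.List.sorted xs (fun z => z) false).getD k "" = x := by
  have hlen : (PySem.List.sorted xs (fun z => z) false).length = xs.length :=
    PySem.List.length_sorted xs (fun z => z) false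
  have hperm : (PySem.List.sorted xs (fun z => z) false).Perm xs :=
    PySem.List.sorted_perm xs (fun z => z) false
  have hk' : k < (PySem.List.sorted xs (fun z => z) false).length := by omega
  rw [List.getD_eq_getElem _ "" hk']
  apply pvBracket_getElem _ k x hk'
  · intro i j hij hj
    exact PySem.List.sorted_id_getElem_mono xs hij hj
  · rw [hperm.countP_eq]; exact h1
  · rw [hperm.countP_eq]; exact h2

theorem pvSelect_eq_sorted (xs : List String) (k : Nat) (hk : k < xs.length) :
    pvSelect xs k = (PySem.List.sorted xs (fun z => z) false).getD k "" := by
  obtain ⟨_, h1, h2⟩ := pvSelect_bracket xs.length xs k le_rfl hk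
  exact (pvSorted_bracket xs k _ hk h1 h2).symm

-- A's sort-and-index median equals B's quickselect median
theorem pvMedian_eq (examples : List (List String)) (index : Int) (h : examples ≠ []) :
    findMedian examples index =
      pvSelect (examples.map (fun e => PySem.List.pyGetD e index ""))
        ((examples.map (fun e => PySem.List.pyGetD e index "")).length / 2) := by
  unfold findMedian
  simp only [PySem.List.foldl_append_singleton_eq_map, List.nil_append]
  set col := examples.map (fun e => PySem.List.pyGetD e index "") with hcol
  have hc : col ≠ [] := by
    simp only [hcol, ne_eq, List.map_eq_nil_iff]
    exact h
  have hlen : (PySem.List.sorted col (fun x => x) false).length = col.length :=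
    PySem.List.length_sorted col (fun x => x) false
  rw [PySem.List.len_eq]
  have h2 : PySem.Int.floordiv ((PySem.List.sorted col (fun x => x) false).length : Int) 2 =
      (((PySem.List.sorted col (fun x => x) false).length / 2 : Nat) : Int) := by
    exact_mod_cast PySem.Int.floordiv_natCast _ 2
  rw [h2, PySem.List.pyGetD_natCast, hlen]
  have hk : col.length / 2 < col.length :=
    Nat.div_lt_self (List.length_pos_iff.mpr hc) (by norm_num)
  exact (pvSelect_eq_sorted col _ hk).symm

theorem pvFoldlOr (l : List (String × List String)) (b : Bool) :
    l.foldl (fun b p => b || pvPat p) b = (b || l.any pvPat) := by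
  induction l generalizing b with
  | nil => simp
  | cons p t ih => simp [List.foldl_cons, ih, Bool.or_assoc]

-- ===== VERDICT (by name: the statement is the Claim_ definition above) =====
theorem solveNumberic_spec : Claim_equal_solveNumberic := by
  intro examples a columns _hdom hpre
  obtain ⟨hnd, hall⟩ := hpre
  unfold Spec_solveNumberic
  have hcong : ∀ (acc : Bool × PySem.Dict String (List String)), ∀ p ∈ a,
      (let vals := (PySem.Dict.mk a).getD p.1 []
       let value := PySem.List.pyGetD vals 0 ""
       if PySem.Str.startswith value "<" && PySem.Str.endswith value ">" then
         let index : Int := (((PySem.List.index? columns p.1).getD 0 : Nat) : Int)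
         let median := findMedian examples index
         (true, acc.2.insert p.1 ["<<" ++ median ++ ">", "<>" ++ median ++ ">"])
       else
         (acc.1, acc.2.insert p.1 vals)) =
      (acc.1 || pvPat p, acc.2.insert p.1 (pvNewValues examples columns p.1 p.2)) := by
    intro acc p hp
    have hv : (PySem.Dict.mk a).getD p.1 [] = p.2 :=
      PySem.Dict.getD_of_mem_items (PySem.Dict.mk a) (by simpa using hp) (by simpa using hnd) []
    simp only [hv, pvPat, pvNewValues]
    by_cases hp2 : (PySem.Str.startswith (PySem.List.pyGetD p.2 0 "") "<" &&
        PySem.Str.endswith (PySem.List.pyGetD p.2 0 "") ">") = true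
    · have hne : examples ≠ [] := ((hall p hp).2 hp2).2.1
      rw [if_pos hp2, if_pos hp2, pvMedian_eq examples _ hne, hp2, Bool.or_true]
    · rw [if_neg hp2, if_neg hp2]
      have hp2' : (PySem.Str.startswith (PySem.List.pyGetD p.2 0 "") "<" &&
          PySem.Str.endswith (PySem.List.pyGetD p.2 0 "") ">") = false := by
        simpa using hp2
      rw [hp2', Bool.or_false]
  have hA : solveNumberic examples a columns =
      (if a.foldl (fun b p => b || pvPat p) false then
        (a.foldl (fun d p => d.insert p.1 (pvNewValues examples columns p.1 p.2))
          PySem.Dict.empty).items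
      else a) := by
    unfold solveNumberic
    rw [PySem.List.foldl_congr_mem a _
      (fun (acc : Bool × PySem.Dict String (List String)) p =>
        (acc.1 || pvPat p, acc.2.insert p.1 (pvNewValues examples columns p.1 p.2)))
      ((false : Bool), PySem.Dict.empty) hcong]
    rw [show (List.foldl
        (fun (acc : Bool × PySem.Dict String (List String)) (p : String × List String) =>
          (acc.1 || pvPat p, acc.2.insert p.1 (pvNewValues examples columns p.1 p.2)))
        ((false : Bool), PySem.Dict.empty) a) =
        (List.foldl (fun b p => b || pvPat p) false a,
         List.foldl (fun d p => d.insert p.1 (pvNewValues examples columns p.1 p.2))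
           PySem.Dict.empty a) from
      PySem.List.foldl_prod_mk (fun b p => b || pvPat p)
        (fun d p => d.insert p.1 (pvNewValues examples columns p.1 p.2)) a false PySem.Dict.empty]
  rw [hA]
  unfold solveNumberic_alt
  by_cases hflag : a.foldl (fun b p => b || pvPat p) false = true
  · rw [if_pos hflag]
    rw [PySem.Dict.items_foldl_insert_fresh a (fun p => p.1)
      (fun p => pvNewValues examples columns p.1 p.2) PySem.Dict.empty
      (fun p _ => PySem.Dict.contains_empty p.1) (by simpa using hnd)]
    rfl
  · rw [if_neg hflag]
    rw [pvFoldlOr] at hflag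
    simp only [Bool.false_or, Bool.not_eq_true] at hflag
    have hnone : ∀ p ∈ a, pvPat p = false := by
      intro p hp
      have := List.any_eq_false.mp hflag p hp
      simpa using this
    symm
    have hid : ∀ p ∈ a, (p.1, pvNewValues examples columns p.1 p.2) = p := by
      intro p hp
      have h0 : pvNewValues examples columns p.1 p.2 = p.2 := by
        unfold pvNewValues
        rw [if_neg (by simpa [pvPat] using hnone p hp)]
      rw [h0]
    rw [List.map_congr_left hid]
    exact List.map_id' a
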